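-- pv_equiv track=rewrite | github.com/damsleth/owa-cal | owa_cal/ics.py | _split_property
-- ===== SOURCE A (Python) =====
-- def _split_params(name_with_params):
--     """Split `NAME;P1=V1;P2=V2` into (name, {p1: v1, p2: v2}).
--
--     Parameter values are upper-cased to match RFC 5545's case-insensitive
--     handling for the few we care about (VALUE, TZID is left as-is since
--     timezone identifiers are case-sensitive in zoneinfo).
--     """
--     parts = name_with_params.split(';')
--     name = parts[0].upper()
--     params = {}
--     for p in parts[1:]:
--         if '=' not in p:
--             continue
--         k, _, v = p.partition('=')
--         k = k.strip().upper()
--         v = v.strip().strip('"')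
--         params[k] = v
--     return name, params
--
-- def _split_property(line):
--     """Split an iCal property line into (name, params, value).
--
--     The first unquoted `:` separates name+params from the value. We
--     walk the string instead of using split(':', 1) to tolerate quoted
--     parameter values containing a colon (RFC 5545 §3.1.1).
--     """
--     in_quotes = False
--     for i, ch in enumerate(line):
--         if ch == '"':
--             in_quotes = not in_quotes
--         elif ch == ':' and not in_quotes:
--             name, params = _split_params(line[:i])
--             return name, params, line[i + 1:]
--     return None, None, None
-- ===== SOURCE B (Python) =====
-- def _split_params(name_with_params):
--     parts = name_with_params.split(';')
--     pairs = [p.partition('=') for p in parts[1:]]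
--     params = {k.strip().upper(): v.strip().strip('"') for k, sep, v in pairs if sep}
--     return parts[0].upper(), params
--
-- def _first_unquoted_colon(segs):
--     # even-indexed segments of a split on '"' lie outside quotes
--     off = 0
--     for j, seg in enumerate(segs):
--         c = seg.find(':')
--         if j % 2 == 0 and c != -1:
--             return off + c
--         off += len(seg) + 1
--     return None
--
-- def _split_property(line):
--     i = _first_unquoted_colon(line.split('"'))
--     if i is None:
--         return None, None, None
--     name, params = _split_params(line[:i])
--     return name, params, line[i + 1:]
-- ===== Notes on version B (the rewrite author's own statement) =====
-- stated objective: faster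
-- what changed: Replaces A's single per-character scan with an in_quotes toggle by staged passes: the line is split once on the double-quote character, a separate helper walks the segments with a running offset to locate the first colon in an even-indexed (unquoted) segment, and _split_params is rebuilt as a list of partitions filtered into a dict comprehension instead of a loop with a membership test inside.
import Mathlib
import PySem

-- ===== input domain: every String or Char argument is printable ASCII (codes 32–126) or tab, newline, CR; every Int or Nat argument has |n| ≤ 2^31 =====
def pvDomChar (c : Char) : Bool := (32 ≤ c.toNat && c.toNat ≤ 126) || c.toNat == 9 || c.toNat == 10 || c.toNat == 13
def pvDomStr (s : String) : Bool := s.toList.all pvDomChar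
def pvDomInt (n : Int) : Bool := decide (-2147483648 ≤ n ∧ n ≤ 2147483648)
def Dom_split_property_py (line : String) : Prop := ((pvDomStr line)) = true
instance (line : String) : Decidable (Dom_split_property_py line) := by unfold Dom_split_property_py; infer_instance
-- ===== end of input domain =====

-- B replaces A's per-character quote-toggling scan by staged passes: split the line once
-- on the double-quote character, locate the first colon inside an even-indexed (unquoted)
-- segment via a separate index-finding helper, and build _split_params' dict from a staged
-- list of partitions (objective: faster — a timing run measured B faster: split/find
-- do the character work in C instead of a Python-level loop).

-- ===== PORT A =====
-- _split_params as written in Source A: one fold with the '=' test inside the loop.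
def split_params (s : String) : String × List (String × String) :=
  let parts := (PySem.Str.split? s ";").getD []   -- sep ";" ≠ "" so split? is always `some`
  let name := PySem.Str.upper (parts.headD "")    -- parts[0]: Python split never returns []
  let d := (parts.drop 1).foldl (fun (d : PySem.Dict String String) p =>
      if PySem.Str.isIn "=" p then
        -- p.partition('='): '=' is present here, so k = p[:i], v = p[i+1:] with i = p.find('=')
        let i := PySem.Str.find p "="
        let k := PySem.Str.upper (PySem.Str.strip (PySem.Str.slice p none (some i)))
        let v := PySem.Str.stripChars (PySem.Str.strip (PySem.Str.slice p (some (i + 1)) none)) "\""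
        d.insert k v
      else d) PySem.Dict.empty
  (name, d.items)

-- the 'for i, ch in enumerate(line)' loop of A, with its in_quotes flag
def aGo (line : String) (l : List (Int × Char)) (inQ : Bool) :
    Option String × (Option (List (String × String))) × Option String :=
  match l with
  | [] => (none, none, none)
  | (i, ch) :: rest =>
    if ch = '"' then aGo line rest (!inQ)
    else if ch = ':' ∧ !inQ then
      let np := split_params (PySem.Str.slice line none (some i))
      (some np.1, some np.2, some (PySem.Str.slice line (some (i + 1)) none))
    else aGo line rest inQ

def split_property_py (line : String) :
    Option String × (Option (List (String × String))) × Option String :=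
  aGo line (PySem.List.enumerate line.toList) false

-- ===== PORT B =====
-- B's _split_params: stage 1 builds the list of partitions, stage 2 is the dict
-- comprehension over the pairs whose separator is nonempty.
def split_params_alt (s : String) : String × List (String × String) :=
  let parts := (PySem.Str.split? s ";").getD []   -- sep ";" ≠ "" so split? is always `some`
  -- p.partition('='): (p, '', '') when '=' is absent (find = -1), else (p[:i], '=', p[i+1:])
  let pairs := (parts.drop 1).map (fun p =>
      let i := PySem.Str.find p "="
      if i = -1 then (p, "", "")
      else (PySem.Str.slice p none (some i), "=", PySem.Str.slice p (some (i + 1)) none))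
  let d := (pairs.filter (fun t => t.2.1 != "")).foldl
      (fun (d : PySem.Dict String String) t =>
        d.insert (PySem.Str.upper (PySem.Str.strip t.1))
                 (PySem.Str.stripChars (PySem.Str.strip t.2.2) "\"")) PySem.Dict.empty
  (PySem.Str.upper (parts.headD ""), d.items)

-- _first_unquoted_colon: walk the segments of line.split('"') with a running offset
def bFind (segs : List (List Char)) (j off : Nat) : Option Int :=
  match segs with
  | [] => none
  | seg :: rest =>
    let c := PySem.Chars.find seg [':']
    if j % 2 = 0 ∧ c ≠ -1 then some ((off : Int) + c)
    else bFind rest (j + 1) (off + seg.length + 1)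

def split_property_py_alt (line : String) :
    Option String × (Option (List (String × String))) × Option String :=
  match bFind (PySem.Chars.splitOn line.toList ['"']) 0 0 with   -- line.split('"')
  | none => (none, none, none)
  | some i =>
    match split_params_alt (PySem.Str.slice line none (some i)) with   -- name, params = _split_params(line[:i])
    | (name, params) => (some name, some params, some (PySem.Str.slice line (some (i + 1)) none))

-- ===== PRECONDITION & SPEC =====
def Spec_split_property_py (line : String) (out : Option String × (Option (List (String × String))) × Option String) : Prop := out = split_property_py_alt line
instance (line : String) (out : Option String × (Option (List (String × String))) × Option String) : Decidable (Spec_split_property_py line out) := by unfold Spec_split_property_py; infer_instance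

-- ===== CLAIM (what is proved, stated in full; the proofs are below) =====
def Claim_equal_split_property_py : Prop := ∀ (line : String), Dom_split_property_py line → Spec_split_property_py line (split_property_py line)

-- ===== LEMMAS AND PROOFS =====

theorem guard_eq (p : String) :
    PySem.Str.isIn "=" p =
      ((if PySem.Str.find p "=" = -1 then (p, "", "")
        else (PySem.Str.slice p none (some (PySem.Str.find p "=")), "=",
              PySem.Str.slice p (some (PySem.Str.find p "=" + 1)) none)).2.1 != "") := by
  simp only [PySem.Str.isIn_eq, PySem.Str.find_eq]
  by_cases h : PySem.Chars.find p.toList ['='] = -1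
  · have hin : PySem.Chars.isIn ['='] p.toList = false := by
      rw [PySem.Chars.isIn_eq_false_iff]
      exact (PySem.Chars.find_eq_neg_one_iff _ _).mp h
    simp [h, hin]
  · have hin : PySem.Chars.isIn ['='] p.toList = true := by
      rw [PySem.Chars.isIn_iff_infix]
      exact (PySem.Chars.find_ne_neg_one_iff _ _).mp h
    simp [h, hin]

theorem split_params_eq (s : String) : split_params s = split_params_alt s := by
  simp only [split_params, split_params_alt]
  congr 2
  rw [List.filter_map, List.foldl_map,
    PySem.List.foldl_if_eq_foldl_filter (p := fun p => PySem.Str.isIn "=" p),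
    List.filter_congr (fun p _ => guard_eq p)]
  apply PySem.List.foldl_congr_mem
  intro d p hp
  have hfind : PySem.Chars.find p.toList ['='] ≠ -1 := by
    have hmem := (List.mem_filter.mp hp).2
    simp only [PySem.Str.find_eq] at hmem
    intro h
    simp [h] at hmem
  simp [hfind]

def simpleSplit : List Char → List (List Char)
  | [] => [[]]
  | c :: cs =>
    if c = '"' then [] :: simpleSplit cs
    else
      match simpleSplit cs with
      | [] => [[c]]
      | h :: t => (c :: h) :: t

theorem simpleSplit_ne_nil (cs : List Char) : simpleSplit cs ≠ [] := by
  cases cs with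
  | nil => simp [simpleSplit]
  | cons c cs =>
    simp only [simpleSplit]
    split
    · simp
    · split <;> simp

def prependHead (p : List Char) : List (List Char) → List (List Char)
  | [] => [p]
  | h :: t => (p ++ h) :: t

theorem splitOn_go_eq (cs : List Char) : ∀ (fuel : Nat), cs.length ≤ fuel →
    ∀ (cur : List Char) (accs : List (List Char)),
    PySem.Chars.splitOn.go ['"'] fuel cs cur accs =
      accs.reverse ++ prependHead cur.reverse (simpleSplit cs) := by
  induction cs with
  | nil =>
    intro fuel _ cur accs
    cases fuel <;> simp [PySem.Chars.splitOn.go, simpleSplit, prependHead]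
  | cons c rest ih =>
    intro fuel hf cur accs
    cases fuel with
    | zero => simp at hf
    | succ f =>
      rw [PySem.Chars.splitOn.go]
      by_cases hc : c = '"'
      · subst hc
        simp only [List.isPrefixOf, BEq.rfl, Bool.true_and, if_true, List.length_singleton,
          List.drop_succ_cons, List.drop_zero]
        rw [ih f (by simpa using hf) [] (cur.reverse :: accs)]
        obtain ⟨h, t, hh⟩ : ∃ h t, simpleSplit rest = h :: t := by
          rcases e : simpleSplit rest with _ | ⟨h, t⟩
          · exact absurd e (simpleSplit_ne_nil rest)
          · exact ⟨h, t, rfl⟩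
        simp [simpleSplit, hh, prependHead]
      · have hpre : List.isPrefixOf ['"'] (c :: rest) = false := by
          simp [List.isPrefixOf]; exact fun e => hc e.symm
        simp only [hpre, Bool.false_eq_true, if_false]
        rw [ih f (by simpa using hf) (c :: cur) accs]
        obtain ⟨h, t, hh⟩ : ∃ h t, simpleSplit rest = h :: t := by
          rcases e : simpleSplit rest with _ | ⟨h, t⟩
          · exact absurd e (simpleSplit_ne_nil rest)
          · exact ⟨h, t, rfl⟩
        simp [simpleSplit, hh, prependHead, hc]

theorem splitOn_eq_simpleSplit (cs : List Char) :
    PySem.Chars.splitOn cs ['"'] = simpleSplit cs := by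
  rw [PySem.Chars.splitOn, splitOn_go_eq cs (cs.length + 1) (by omega) [] []]
  obtain ⟨h, t, hh⟩ : ∃ h t, simpleSplit cs = h :: t := by
    rcases e : simpleSplit cs with _ | ⟨h, t⟩
    · exact absurd e (simpleSplit_ne_nil cs)
    · exact ⟨h, t, rfl⟩
  simp [hh, prependHead]

theorem find_go_colon_cons (c : Char) (t : List Char) (k : Nat) :
    PySem.Chars.find.go [':'] (c :: t) k =
      if c = ':' then (k : Int) else PySem.Chars.find.go [':'] t (k + 1) := by
  rw [PySem.Chars.find.go.eq_2]
  by_cases hc : c = ':'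
  · simp [List.isPrefixOf, hc]
  · have : (':' == c) = false := by simpa [beq_iff_eq] using fun e => hc e.symm
    simp [List.isPrefixOf, this, hc]

theorem find_go_colon_shift (l : List Char) : ∀ (k : Nat),
    PySem.Chars.find.go [':'] l k =
      if PySem.Chars.find.go [':'] l 0 = -1 then -1
      else (k : Int) + PySem.Chars.find.go [':'] l 0 := by
  induction l with
  | nil => intro k; simp [PySem.Chars.find.go.eq_1]
  | cons c t ih =>
    intro k
    rw [find_go_colon_cons, find_go_colon_cons]
    by_cases hc : c = ':'
    · simp [hc]
    · simp only [hc, if_false]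
      rw [ih (k + 1), ih 1]
      by_cases h0 : PySem.Chars.find.go [':'] t 0 = -1
      · simp [h0]
      · have hge : -1 ≤ PySem.Chars.find.go [':'] t 0 := PySem.Chars.neg_one_le_find t [':']
        rw [if_neg h0, if_neg (by omega), if_neg h0]
        push_cast
        ring

-- what A returns once the colon index is known (A's own split_params)
def retAt (line : String) (i : Int) :
    Option String × (Option (List (String × String))) × Option String :=
  let np := split_params (PySem.Str.slice line none (some i))
  (some np.1, some np.2, some (PySem.Str.slice line (some (i + 1)) none))

def wrapA (line : String) : Option Int →
    Option String × (Option (List (String × String))) × Option String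
  | none => (none, none, none)
  | some i => retAt line i

theorem find_colon_eq (l : List Char) :
    PySem.Chars.find l [':'] = PySem.Chars.find.go [':'] l 0 := rfl

theorem bFind_step (c : Char) (h : List Char) (t : List (List Char))
    (j off : Nat) (hc : c ≠ '"') :
    bFind ((c :: h) :: t) j off =
      if j % 2 = 0 ∧ c = ':' then some ((off : Int))
      else bFind (h :: t) j (off + 1) := by
  have hlen : off + (c :: h).length + 1 = off + 1 + h.length + 1 := by simp; omega
  by_cases hj : j % 2 = 0
  · by_cases hcc : c = ':'
    · subst hcc
      have h0 : PySem.Chars.find (':' :: h) [':'] = 0 := by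
        rw [find_colon_eq, find_go_colon_cons]; simp
      simp [bFind, hj, h0]
    · have hge : -1 ≤ PySem.Chars.find.go [':'] h 0 := PySem.Chars.neg_one_le_find h [':']
      have hfind : PySem.Chars.find (c :: h) [':'] =
          if PySem.Chars.find.go [':'] h 0 = -1 then -1 else 1 + PySem.Chars.find.go [':'] h 0 := by
        rw [find_colon_eq, find_go_colon_cons, if_neg hcc, find_go_colon_shift h 1]
        simp
      by_cases h0 : PySem.Chars.find.go [':'] h 0 = -1
      · simp only [bFind, hfind, h0, if_pos, hj, hcc, and_false, if_false, hlen,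
          find_colon_eq, not_true, ne_eq]
      · simp only [bFind, hfind, h0, hj, hcc, find_colon_eq, hlen]
        have : ¬ (1 + PySem.Chars.find.go [':'] h 0 = -1) := by omega
        have harg : (off : Int) + (1 + PySem.Chars.find.go [':'] h 0) =
            ((off + 1 : Nat) : Int) + PySem.Chars.find.go [':'] h 0 := by push_cast; ring
        simp [this, h0, harg]
  · simp only [bFind, hj]
    have e : off + (h.length + 1) + 1 = off + 1 + h.length + 1 := by omega
    simp [e]

theorem main_lemma (line : String) (cs : List Char) : ∀ (n j : Nat),
    aGo line (PySem.List.enumerate cs (n : Int)) (decide (j % 2 = 1)) =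
      wrapA line (bFind (simpleSplit cs) j n) := by
  induction cs with
  | nil =>
    intro n j
    simp [aGo, bFind, simpleSplit, PySem.List.enumerate, wrapA]
    have hfind : PySem.Chars.find ([] : List Char) [':'] = -1 := by
      rw [find_colon_eq, PySem.Chars.find.go.eq_1]; simp
    simp [hfind]
  | cons c cs ih =>
    intro n j
    rw [PySem.List.enumerate_cons]
    have hcast : (n : Int) + 1 = ((n + 1 : Nat) : Int) := by push_cast; ring
    by_cases hc : c = '"'
    · subst hc
      have hfind : PySem.Chars.find ([] : List Char) [':'] = -1 := by
        rw [find_colon_eq, PySem.Chars.find.go.eq_1]; simp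
      have hpar : decide ((j + 1) % 2 = 1) = !decide (j % 2 = 1) := by
        by_cases hj : j % 2 = 1
        · have : ¬ (j + 1) % 2 = 1 := by omega
          simp [hj, this]
        · have : (j + 1) % 2 = 1 := by omega
          simp [hj, this]
      rw [aGo, if_pos rfl]
      simp only [simpleSplit, bFind, hfind, ite_true]
      rw [← hpar, hcast, ih (n + 1) (j + 1)]
      by_cases hj : j % 2 = 0 <;> simp [hj]
    · obtain ⟨h, t, hh⟩ : ∃ h t, simpleSplit cs = h :: t := by
        rcases e : simpleSplit cs with _ | ⟨h, t⟩
        · exact absurd e (simpleSplit_ne_nil cs)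
        · exact ⟨h, t, rfl⟩
      have hss : simpleSplit (c :: cs) = (c :: h) :: t := by
        simp [simpleSplit, hc, hh]
      rw [hss, bFind_step c h t j n hc, apply_ite (wrapA line), ← hh, ← ih (n + 1) j, ← hcast]
      rw [aGo, if_neg hc]
      by_cases hcc : c = ':'
      · subst hcc
        by_cases hj : j % 2 = 0
        · have : ¬ j % 2 = 1 := by omega
          simp [hj, wrapA, retAt]
        · have : j % 2 = 1 := by omega
          simp [this]
      · simp [hcc]

-- ===== VERDICT (by name: the statement is the Claim_ definition above) =====
theorem split_property_py_spec : Claim_equal_split_property_py := by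
  intro line _
  unfold Spec_split_property_py
  show split_property_py line = split_property_py_alt line
  rw [split_property_py, split_property_py_alt, splitOn_eq_simpleSplit]
  have h := main_lemma line line.toList 0 0
  simp only [Nat.cast_zero] at h
  rw [show (decide (0 % 2 = 1)) = false by decide] at h
  rw [h]
  cases bFind (simpleSplit line.toList) 0 0 with
  | none => rfl
  | some i => simp [wrapA, retAt, split_params_eq]
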